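-- pv_equiv track=rewrite | github.com/petersawm/Python-Basics-For-Beginners | Lesson3/22_decorators_and_generators.py | stream_processor
-- ===== SOURCE A (Python) =====
-- def stream_processor(stream):
--     """Process streaming data"""
--     buffer = []
--     for item in stream:
--         buffer.append(item)
--         if len(buffer) >= 5:  # Process in chunks
--             yield sum(buffer)
--             buffer = []
--
--     # Process remaining items
--     if buffer:
--         yield sum(buffer)
-- ===== SOURCE B (Python) =====
-- from itertools import islice
--
-- def stream_processor(stream):
--     """Process streaming data"""
--     it = iter(stream)
--     while True:
--         chunk = list(islice(it, 5))
--         if not chunk: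
--             return
--         yield sum(chunk)
-- ===== Notes on version B (the rewrite author's own statement) =====
-- stated objective: idiomatic
-- what changed: B pulls five items at a time with itertools.islice on a single iterator instead of appending items one-by-one to a buffer list with a per-item length check; the trailing partial chunk falls out automatically when islice yields fewer than 5 items.
import Mathlib
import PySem

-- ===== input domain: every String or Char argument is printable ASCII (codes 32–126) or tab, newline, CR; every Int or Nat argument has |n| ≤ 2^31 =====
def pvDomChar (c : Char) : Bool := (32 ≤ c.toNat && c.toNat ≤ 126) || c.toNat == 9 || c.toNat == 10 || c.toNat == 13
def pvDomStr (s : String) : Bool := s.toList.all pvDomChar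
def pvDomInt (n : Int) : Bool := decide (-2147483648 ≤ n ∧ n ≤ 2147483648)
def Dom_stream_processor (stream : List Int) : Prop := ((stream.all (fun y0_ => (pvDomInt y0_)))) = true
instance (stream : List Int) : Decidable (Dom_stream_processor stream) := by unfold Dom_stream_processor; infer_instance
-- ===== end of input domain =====

-- B replaces A's per-item buffer append + length check with islice-style chunking
-- of five items at a time (idiomatic; same cost). Both are generators; the ports
-- return the list of yielded values.

-- ===== PORT A =====
-- for item in stream: buffer.append(item); if len(buffer) >= 5: yield sum(buffer); buffer = []
def stream_processor_loop (buf out : List Int) : List Int → List Int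
  | [] => if buf ≠ [] then out ++ [buf.sum] else out
  | item :: rest =>
      let buf' := buf ++ [item]
      if buf'.length ≥ 5 then stream_processor_loop [] (out ++ [buf'.sum]) rest
      else stream_processor_loop buf' out rest

def stream_processor (stream : List Int) : List Int :=
  stream_processor_loop [] [] stream

-- ===== PORT B =====
-- while True: chunk = list(islice(it, 5)); if not chunk: return; yield sum(chunk)
def stream_processor_alt (stream : List Int) : List Int :=
  match stream with
  | [] => []
  | x :: r => ((x :: r).take 5).sum :: stream_processor_alt ((x :: r).drop 5)
termination_by stream.length
decreasing_by simp

-- ===== PRECONDITION & SPEC =====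
def Spec_stream_processor (stream : List Int) (out : List Int) : Prop := out = stream_processor_alt stream
instance (stream : List Int) (out : List Int) : Decidable (Spec_stream_processor stream out) := by unfold Spec_stream_processor; infer_instance

-- ===== CLAIM (what is proved, stated in full; the proofs are below) =====
def Claim_equal_stream_processor : Prop := ∀ (stream : List Int), Dom_stream_processor stream → Spec_stream_processor stream (stream_processor stream)

-- ===== LEMMAS AND PROOFS =====

theorem alt_nil : stream_processor_alt [] = [] := by
  simp [stream_processor_alt]

theorem alt_ne_nil (s : List Int) (h : s ≠ []) :
    stream_processor_alt s = (s.take 5).sum :: stream_processor_alt (s.drop 5) := by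
  cases s with
  | nil => exact absurd rfl h
  | cons x r => simp [stream_processor_alt]

-- loop invariant: with a buffer shorter than 5, A's loop emits out ++ chunks of (buf ++ s)
theorem loop_eq (s : List Int) : ∀ (buf out : List Int), buf.length < 5 →
    stream_processor_loop buf out s = out ++ stream_processor_alt (buf ++ s) := by
  induction s with
  | nil =>
    intro buf out h
    cases buf with
    | nil => simp [stream_processor_loop, alt_nil]
    | cons b bs =>
      simp only [stream_processor_loop, List.append_nil]
      rw [alt_ne_nil _ (by simp)]
      have h5 : (b :: bs).take 5 = b :: bs := List.take_of_length_le (by omega)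
      have h5' : (b :: bs).drop 5 = [] := List.drop_of_length_le (by omega)
      simp [h5, h5', alt_nil]
  | cons x rest ih =>
    intro buf out h
    simp only [stream_processor_loop]
    by_cases hlen : (buf ++ [x]).length ≥ 5
    · have hb : buf.length = 4 := by simp at hlen; omega
      rw [if_pos hlen]
      rw [ih [] (out ++ [(buf ++ [x]).sum]) (by simp)]
      rw [show buf ++ x :: rest = (buf ++ [x]) ++ rest from by simp]
      rw [alt_ne_nil ((buf ++ [x]) ++ rest) (by cases buf <;> simp)]
      have htake : ((buf ++ [x]) ++ rest).take 5 = buf ++ [x] := by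
        rw [List.take_append_of_le_length (by simp [hb])]
        exact List.take_of_length_le (by simp [hb])
      have hdrop : ((buf ++ [x]) ++ rest).drop 5 = rest := by
        rw [List.drop_append_of_le_length (by simp [hb])]
        simp [hb]
      have htake2 : List.take 5 (buf ++ x :: rest) = buf ++ [x] := by
        rw [show buf ++ x :: rest = buf ++ [x] ++ rest from by simp]; exact htake
      have hdrop2 : List.drop 5 (buf ++ x :: rest) = rest := by
        rw [show buf ++ x :: rest = buf ++ [x] ++ rest from by simp]; exact hdrop
      simp [htake2, hdrop2]
    · rw [if_neg hlen]
      rw [ih (buf ++ [x]) out (by simp at hlen ⊢; omega)]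
      simp

-- ===== VERDICT (by name: the statement is the Claim_ definition above) =====
theorem stream_processor_spec : Claim_equal_stream_processor := by
  intro stream _
  show stream_processor stream = stream_processor_alt stream
  rw [stream_processor, loop_eq stream [] [] (by simp)]
  simp
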